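-- pv_equiv track=rewrite | github.com/Coderopp/MTP-II | code/04_instance_generator.py | distribute_riders_across_depots
-- ===== SOURCE A (Python) =====
-- def distribute_riders_across_depots(k_total: int, depots: list) -> dict:
--     """
--     Split K riders across the D available dark stores as evenly as possible.
--     Returns {depot_node_id: [rider_0, rider_1, ...]}.
--     """
--     d = len(depots)
--     assert d > 0, "Need at least one depot"
--     base, remainder = divmod(k_total, d)
--     counts = [base + (1 if i < remainder else 0) for i in range(d)]
--
--     mapping = {}
--     rider = 0
--     for depot, n_riders in zip(depots, counts):
--         ids = list(range(rider, rider + n_riders))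
--         mapping[depot["node_id"]] = ids
--         rider += n_riders
--     return mapping
-- ===== SOURCE B (Python) =====
-- def distribute_riders_across_depots(k_total: int, depots: list) -> dict:
--     """
--     Split K riders across the D available dark stores as evenly as possible.
--     Returns {depot_node_id: [rider_0, rider_1, ...]}.
--     """
--     d = len(depots)
--     assert d > 0, "Need at least one depot"
--     base, remainder = divmod(k_total, d)
--     mapping = {}
--     for i, depot in enumerate(depots):
--         start = i * base + min(i, remainder)
--         count = base + (1 if i < remainder else 0)
--         mapping[depot["node_id"]] = list(range(start, start + count))
--     return mapping
-- ===== Notes on version B (the rewrite author's own statement) =====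
-- stated objective: simpler
-- what changed: Drops the precomputed counts list and the running rider accumulator; each depot's ID block is computed directly from its index as start = i*base + min(i, remainder), count = base + (i < remainder).
import Mathlib
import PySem

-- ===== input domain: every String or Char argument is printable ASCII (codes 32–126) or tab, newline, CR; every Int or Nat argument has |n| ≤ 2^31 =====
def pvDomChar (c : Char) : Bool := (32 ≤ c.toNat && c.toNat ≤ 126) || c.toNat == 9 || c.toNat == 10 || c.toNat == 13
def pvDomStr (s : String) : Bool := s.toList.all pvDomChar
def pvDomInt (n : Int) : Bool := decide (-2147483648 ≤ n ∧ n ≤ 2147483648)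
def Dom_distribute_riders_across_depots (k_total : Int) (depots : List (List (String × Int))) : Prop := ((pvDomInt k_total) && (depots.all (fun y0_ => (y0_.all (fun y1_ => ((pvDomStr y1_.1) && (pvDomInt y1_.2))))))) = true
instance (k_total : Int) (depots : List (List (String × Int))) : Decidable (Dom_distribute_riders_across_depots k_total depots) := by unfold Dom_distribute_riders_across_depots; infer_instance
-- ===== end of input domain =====

-- ===== PORT A =====
-- B computes each depot's ID block directly from its index instead of threading a
-- counts list and a running rider accumulator (objective: simpler).
def distribute_riders_across_depots (k_total : Int) (depots : List (List (String × Int))) : List (Int × List Int) :=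
  let d : Int := PySem.List.len depots
  let base : Int := PySem.Int.floordiv k_total d
  let remainder : Int := PySem.Int.mod k_total d
  let counts : List Int := (PySem.List.pyRange 0 d 1).map (fun i => base + (if i < remainder then 1 else 0))
  let res := (depots.zip counts).foldl
    (fun (st : PySem.Dict Int (List Int) × Int) dc =>
      let ids := PySem.List.pyRange st.2 (st.2 + dc.2) 1
      (st.1.insert ((PySem.Dict.mk dc.1).getD "node_id" 0) ids, st.2 + dc.2))
    (PySem.Dict.empty, 0)
  res.1.items

-- ===== PORT B =====
def distribute_riders_across_depots_alt (k_total : Int) (depots : List (List (String × Int))) : List (Int × List Int) :=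
  let d : Int := PySem.List.len depots
  let base : Int := PySem.Int.floordiv k_total d
  let remainder : Int := PySem.Int.mod k_total d
  ((PySem.List.enumerate depots 0).foldl
    (fun (m : PySem.Dict Int (List Int)) p =>
      let start := p.1 * base + min p.1 remainder
      let count := base + (if p.1 < remainder then 1 else 0)
      m.insert ((PySem.Dict.mk p.2).getD "node_id" 0) (PySem.List.pyRange start (start + count) 1))
    PySem.Dict.empty).items

-- ===== PRECONDITION & SPEC =====
-- A asserts at least one depot (AssertionError on []) and does depot["node_id"] (KeyError
-- if the key is missing); Pre_ excludes exactly those raising inputs.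
def Pre_distribute_riders_across_depots (k_total : Int) (depots : List (List (String × Int))) : Prop :=
  depots ≠ [] ∧ ∀ dep ∈ depots, "node_id" ∈ dep.map Prod.fst
instance (k_total : Int) (depots : List (List (String × Int))) : Decidable (Pre_distribute_riders_across_depots k_total depots) := by unfold Pre_distribute_riders_across_depots; infer_instance
def pvWitness_distribute_riders_across_depots : Int × (List (List (String × Int))) :=
  (5, [[("node_id", 10)], [("node_id", 20)]])
def Spec_distribute_riders_across_depots (k_total : Int) (depots : List (List (String × Int))) (out : List (Int × List Int)) : Prop := out = distribute_riders_across_depots_alt k_total depots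
instance (k_total : Int) (depots : List (List (String × Int))) (out : List (Int × List Int)) : Decidable (Spec_distribute_riders_across_depots k_total depots out) := by unfold Spec_distribute_riders_across_depots; infer_instance

-- ===== CLAIM (what is proved, stated in full; the proofs are below) =====
def Claim_equal_distribute_riders_across_depots : Prop := ∀ (k_total : Int) (depots : List (List (String × Int))), Dom_distribute_riders_across_depots k_total depots → Pre_distribute_riders_across_depots k_total depots → Spec_distribute_riders_across_depots k_total depots (distribute_riders_across_depots k_total depots)

-- ===== LEMMAS AND PROOFS =====

-- Fold invariant: A's running rider counter after the first i depots equals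
-- i*base + min i rem, so the two folds build the same dict.
theorem pv_fold_eq (base rem : Int) :
    ∀ (l : List (List (String × Int))) (i : Int), 0 ≤ i →
    ∀ (m : PySem.Dict Int (List Int)),
    ((l.zip ((PySem.List.pyRange i (i + l.length) 1).map
        (fun j => base + (if j < rem then 1 else 0)))).foldl
      (fun (st : PySem.Dict Int (List Int) × Int) dc =>
        (st.1.insert ((PySem.Dict.mk dc.1).getD "node_id" 0)
          (PySem.List.pyRange st.2 (st.2 + dc.2) 1), st.2 + dc.2))
      (m, i * base + min i rem)).1
    = (PySem.List.enumerate l i).foldl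
      (fun (m : PySem.Dict Int (List Int)) p =>
        m.insert ((PySem.Dict.mk p.2).getD "node_id" 0)
          (PySem.List.pyRange (p.1 * base + min p.1 rem)
            (p.1 * base + min p.1 rem + (base + (if p.1 < rem then 1 else 0))) 1))
      m := by
  intro l
  induction l with
  | nil => intro i hi m; simp [PySem.List.enumerate_nil]
  | cons x t ih =>
    intro i hi m
    have hlt : i < i + ((x :: t).length : Int) := by simp only [List.length_cons]; push_cast; omega
    rw [PySem.List.pyRange_one_cons hlt]
    have hrange : PySem.List.pyRange (i + 1) (i + ((x :: t).length : Int)) 1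
        = PySem.List.pyRange (i + 1) ((i + 1) + (t.length : Int)) 1 := by
      congr 1; simp only [List.length_cons]; push_cast; ring
    rw [hrange]
    simp only [List.map_cons, List.zip_cons_cons, List.foldl_cons,
      PySem.List.enumerate_cons]
    have hstep : i * base + min i rem + (base + (if i < rem then 1 else 0))
        = (i + 1) * base + min (i + 1) rem := by
      have hb : (i + 1) * base = i * base + base := by ring
      rw [hb]; by_cases h : i < rem <;> simp [h] <;> omega
    rw [hstep]
    exact ih (i + 1) (by omega) _

-- ===== VERDICT (by name: the statement is the Claim_ definition above) =====
theorem distribute_riders_across_depots_spec : Claim_equal_distribute_riders_across_depots := by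
  intro k_total depots _hdom hpre
  unfold Spec_distribute_riders_across_depots
  unfold distribute_riders_across_depots distribute_riders_across_depots_alt
  simp only [PySem.List.len]
  have hd : 0 < (depots.length : Int) := by
    rcases hpre with ⟨hne, -⟩
    have : depots.length ≠ 0 := by simpa using List.length_eq_zero_iff.not.mpr hne
    omega
  have hrem : 0 ≤ PySem.Int.mod k_total (depots.length : Int) := by
    rw [PySem.Int.mod_eq_emod_of_pos hd]
    exact Int.emod_nonneg _ (by omega)
  have h := pv_fold_eq (PySem.Int.floordiv k_total (depots.length : Int))
      (PySem.Int.mod k_total (depots.length : Int)) depots 0 le_rfl PySem.Dict.empty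
  simp only [zero_add] at h
  have h0 : (0 : Int) * PySem.Int.floordiv k_total (depots.length : Int)
      + min 0 (PySem.Int.mod k_total (depots.length : Int)) = 0 := by
    rw [min_eq_left hrem]; ring
  rw [h0] at h
  exact congrArg PySem.Dict.items h
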